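-- pv_equiv track=rewrite | github.com/Galaktikkon/data-structures-algorithims | all/wyklad/3.py | divIntoGroups
-- ===== SOURCE A (Python) =====
-- import math
--
-- def selectionSort(A):
--     n=len(A)
--
--     for i in range(n):
--
--         currMin=i
--
--         for j in range(i+1,n):
--
--             if A[currMin]>A[j]:
--                 currMin=j
--
--         A[currMin],A[i]=A[i],A[currMin]
--
--     return A
--
-- def divIntoGroups(A):
--     n=len(A)
--     output=[[] for _ in range(math.ceil(n/5))]
--
--     for i in range(n):
--         output[i//5].append(A[i])
--
--     for i in range(len(output)):
--         output[i]=selectionSort(output[i])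
--
--     return output
-- ===== SOURCE B (Python) =====
-- def divIntoGroups(A):
--     return [sorted(A[i:i + 5]) for i in range(0, len(A), 5)]
-- ===== Notes on version B (the rewrite author's own statement) =====
-- stated objective: simpler
-- what changed: Replaces the ceil-sized preallocation plus index//5 append loop and the hand-written selection-sort double loop with a single list comprehension: slice each 5-element chunk and sort it with the built-in sorted().
import Mathlib
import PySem

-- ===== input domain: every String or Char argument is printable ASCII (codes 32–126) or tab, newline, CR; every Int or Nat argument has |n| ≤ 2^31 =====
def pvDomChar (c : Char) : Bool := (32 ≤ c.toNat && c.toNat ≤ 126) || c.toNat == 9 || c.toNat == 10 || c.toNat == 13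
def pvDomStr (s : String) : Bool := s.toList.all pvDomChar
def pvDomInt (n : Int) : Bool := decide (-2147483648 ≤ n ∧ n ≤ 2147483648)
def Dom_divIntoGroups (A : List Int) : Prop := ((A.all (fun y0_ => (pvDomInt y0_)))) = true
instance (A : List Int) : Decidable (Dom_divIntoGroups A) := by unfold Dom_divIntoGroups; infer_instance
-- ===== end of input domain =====

-- B replaces A's index//5 append loop and hand-written selection sort by slicing 5-element chunks and sorting each with the library sort (simpler).
-- A mutates its argument's chunk lists in place in Python; the equivalence proved here is about the return value only.

-- ===== PORT A =====
-- inner loop 'currMin = i; for j in range(i+1, n): if A[currMin] > A[j]: currMin = j'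
def pvArgMinFrom (xs : List Int) (i : Nat) : Nat :=
  (List.range' (i + 1) (xs.length - (i + 1))).foldl
    (fun cm j => if xs.getD cm 0 > xs.getD j 0 then j else cm) i

-- outer loop 'for i in range(n): … A[currMin], A[i] = A[i], A[currMin]'
def pvSelSortLoop (xs : List Int) (i : Nat) : List Int :=
  if _h : i < xs.length then
    let m := pvArgMinFrom xs i
    pvSelSortLoop ((xs.set m (xs.getD i 0)).set i (xs.getD m 0)) (i + 1)
  else xs
termination_by xs.length - i
decreasing_by simp only [List.length_set]; omega

def pvSelectionSort (xs : List Int) : List Int := pvSelSortLoop xs 0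

def divIntoGroups (A : List Int) : List (List Int) :=
  let n := A.length
  -- math.ceil(n/5) = (n+4)/5 exactly for these list lengths (float division is exact below 2^53)
  let output := List.replicate ((n + 4) / 5) ([] : List Int)
  -- for i in range(n): output[i//5].append(A[i])
  let output := (List.range n).foldl
    (fun out i => out.modify (i / 5) (fun g => g ++ [A.getD i 0])) output
  -- for i in range(len(output)): output[i] = selectionSort(output[i])
  output.map pvSelectionSort

-- ===== PORT B =====
def divIntoGroups_alt (A : List Int) : List (List Int) :=
  (PySem.List.pyRange 0 (A.length : Int) 5).map
    (fun i => PySem.List.sorted (PySem.List.slice A (some i) (some (i + 5))) (fun x => x) false)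

-- ===== PRECONDITION & SPEC =====
def Spec_divIntoGroups (A : List Int) (out : List (List Int)) : Prop := out = divIntoGroups_alt A
instance (A : List Int) (out : List (List Int)) : Decidable (Spec_divIntoGroups A out) := by unfold Spec_divIntoGroups; infer_instance

-- ===== CLAIM (what is proved, stated in full; the proofs are below) =====
def Claim_equal_divIntoGroups : Prop := ∀ (A : List Int), Dom_divIntoGroups A → Spec_divIntoGroups A (divIntoGroups A)

-- ===== LEMMAS AND PROOFS =====

-- the list of 5-element chunks of A, the common shape of both ports' results
def pvChunk5 : List Int → List (List Int)
  | [] => []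
  | x :: xs => ((x :: xs).take 5) :: pvChunk5 ((x :: xs).drop 5)
termination_by l => l.length
decreasing_by simp [List.length_drop]

theorem pvChunk5_char (A : List Int) :
    pvChunk5 A = (List.range ((A.length + 4) / 5)).map (fun g => (A.drop (5 * g)).take 5) := by
  induction A using pvChunk5.induct with
  | case1 => simp [pvChunk5]
  | case2 x xs ih =>
    rw [pvChunk5]
    have hn : ((x :: xs).length + 4) / 5 = (((x :: xs).drop 5).length + 4) / 5 + 1 := by
      simp only [List.length_cons, List.length_drop]; omega
    rw [hn, List.range_succ_eq_map, List.map_cons, List.map_map, ih]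
    refine congrArg₂ _ (by norm_num) ?_
    apply List.map_congr_left
    intro g _
    simp only [Function.comp_apply, List.drop_drop]
    have h55 : 5 + 5 * g = 5 * g.succ := by omega
    rw [h55]

theorem pvModify_map_range {β : Type} (N j : Nat) (f : Nat → β) (h : β → β) :
    ((List.range N).map f).modify j h
      = (List.range N).map (fun g => if g = j then h (f g) else f g) := by
  apply List.ext_getElem
  · simp
  · intro k hk1 hk2
    simp only [List.getElem_modify, List.getElem_map, List.getElem_range]
    by_cases hkj : j = k <;> simp [hkj, eq_comm]

theorem pvFill_char (A : List Int) (m : Nat) (hm : m ≤ A.length) :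
    (List.range m).foldl
      (fun out i => out.modify (i / 5) (fun g => g ++ [A.getD i 0]))
      (List.replicate ((A.length + 4) / 5) ([] : List Int))
    = (List.range ((A.length + 4) / 5)).map
        (fun g => (List.range' (5 * g) (min 5 (m - 5 * g))).map (fun i => A.getD i 0)) := by
  induction m with
  | zero => simp
  | succ m ih =>
    have hm' : m ≤ A.length := by omega
    rw [List.range_succ, List.foldl_append, ih hm', List.foldl_cons, List.foldl_nil,
      pvModify_map_range]
    apply List.map_congr_left
    intro g hg
    rw [List.mem_range] at hg
    by_cases hgj : g = m / 5
    · have h1 : min 5 (m + 1 - 5 * g) = (m - 5 * g) + 1 := by omega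
      have h2 : min 5 (m - 5 * g) = m - 5 * g := by omega
      rw [if_pos hgj, h1, h2, List.range'_concat, List.map_append]
      have h3 : 5 * g + 1 * (m - 5 * g) = m := by omega
      rw [h3]
      simp
    · have h1 : min 5 (m + 1 - 5 * g) = min 5 (m - 5 * g) := by omega
      rw [if_neg hgj, h1]

theorem pvMap_range'_getD (A : List Int) (k : Nat) : ∀ (s : Nat), s + k ≤ A.length →
    (List.range' s k).map (fun i => A.getD i 0) = (A.drop s).take k := by
  induction k with
  | zero => intro s _; simp
  | succ k ih =>
    intro s hs
    have hsl : s < A.length := by omega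
    rw [List.range'_succ, List.map_cons, ih (s+1) (by omega),
      List.drop_eq_getElem_cons hsl, List.take_succ_cons, List.getD_eq_getElem _ _ hsl]

theorem pvA_char (A : List Int) :
    divIntoGroups A = (pvChunk5 A).map pvSelectionSort := by
  rw [divIntoGroups]
  rw [pvFill_char A A.length le_rfl, pvChunk5_char, List.map_map, List.map_map]
  apply List.map_congr_left
  intro g hg
  rw [List.mem_range] at hg
  simp only [Function.comp_apply]
  congr 1
  have hle : 5 * g + min 5 (A.length - 5 * g) ≤ A.length := by omega
  rw [pvMap_range'_getD A _ _ hle]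
  rcases Nat.lt_or_ge (A.length - 5 * g) 5 with h | h
  · rw [min_eq_right (le_of_lt h),
      List.take_of_length_le (by simp), List.take_of_length_le (by simp; omega)]
  · rw [min_eq_left h]

theorem pvAlt_char (A : List Int) :
    divIntoGroups_alt A = (pvChunk5 A).map (fun c => PySem.List.sorted c (fun x => x) false) := by
  rw [divIntoGroups_alt, PySem.List.pyRange_of_pos 0 (A.length : Int) (by norm_num),
    pvChunk5_char, List.map_map]
  have hcnt : (if (0:Int) < (A.length : Int) then (((A.length : Int) - 0 + 5 - 1) / 5).toNat else 0)
      = (A.length + 4) / 5 := by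
    by_cases h : 0 < A.length
    · rw [if_pos (by exact_mod_cast h)]
      omega
    · have h0 : A.length = 0 := by omega
      simp [h0]
  rw [hcnt, List.map_map]
  apply List.map_congr_left
  intro k _
  simp only [Function.comp_apply]
  have h1 : (0 : Int) + 5 * (k : Nat) = ((5 * k : Nat) : Int) := by push_cast; ring
  have h2 : ((5 * k : Nat) : Int) + 5 = ((5 * k + 5 : Nat) : Int) := by push_cast; ring
  rw [h1, h2, PySem.List.slice_natCast]
  congr 2
  omega

theorem pvFoldMin_spec (xs : List Int) (L : List Nat) : ∀ (c : Nat),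
    (L.foldl (fun cm j => if xs.getD cm 0 > xs.getD j 0 then j else cm) c = c ∨
     L.foldl (fun cm j => if xs.getD cm 0 > xs.getD j 0 then j else cm) c ∈ L) ∧
    xs.getD (L.foldl (fun cm j => if xs.getD cm 0 > xs.getD j 0 then j else cm) c) 0 ≤ xs.getD c 0 ∧
    ∀ j ∈ L, xs.getD (L.foldl (fun cm j => if xs.getD cm 0 > xs.getD j 0 then j else cm) c) 0 ≤ xs.getD j 0 := by
  induction L with
  | nil => intro c; simp
  | cons a t ih =>
    intro c
    rw [List.foldl_cons]
    obtain ⟨hmem, hle, hall⟩ := ih (if xs.getD c 0 > xs.getD a 0 then a else c)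
    refine ⟨?_, ?_, ?_⟩
    · rcases hmem with h | h
      · rw [h]; split_ifs with hc
        · exact Or.inr (List.mem_cons_self)
        · exact Or.inl rfl
      · exact Or.inr (List.mem_cons_of_mem _ h)
    · refine le_trans hle ?_
      split_ifs with hc <;> omega
    · intro j hj
      rcases List.mem_cons.mp hj with rfl | hj
      · refine le_trans hle ?_
        split_ifs with hc <;> omega
      · exact hall j hj

theorem pvArgMin_spec (xs : List Int) (i : Nat) (hi : i < xs.length) :
    i ≤ pvArgMinFrom xs i ∧ pvArgMinFrom xs i < xs.length ∧
    ∀ q, i ≤ q → q < xs.length → xs.getD (pvArgMinFrom xs i) 0 ≤ xs.getD q 0 := by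
  obtain ⟨hmem, hle, hall⟩ := pvFoldMin_spec xs (List.range' (i + 1) (xs.length - (i + 1))) i
  unfold pvArgMinFrom
  have hb : pvArgMinFrom xs i = i ∨ i + 1 ≤ pvArgMinFrom xs i ∧ pvArgMinFrom xs i < xs.length := by
    unfold pvArgMinFrom
    rcases hmem with h | h
    · exact Or.inl h
    · rw [List.mem_range'_1] at h; exact Or.inr ⟨h.1, by omega⟩
  refine ⟨?_, ?_, ?_⟩
  · rcases hb with h | h
    · unfold pvArgMinFrom at h; omega
    · unfold pvArgMinFrom at h; omega
  · rcases hb with h | h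
    · unfold pvArgMinFrom at h; omega
    · unfold pvArgMinFrom at h; omega
  · intro q hq1 hq2
    rcases Nat.eq_or_lt_of_le hq1 with rfl | hlt
    · exact hle
    · exact hall q (by rw [List.mem_range'_1]; omega)

theorem pvSwap_perm (xs : List Int) (i m : Nat) (hi : i < xs.length) (hm : m < xs.length) :
    ((xs.set m (xs.getD i 0)).set i (xs.getD m 0)).Perm xs := by
  have h := Array.swap_perm (xs := xs.toArray) (i := m) (j := i)
    (by simpa using hm) (by simpa using hi)
  rw [List.getD_eq_getElem _ _ hi, List.getD_eq_getElem _ _ hm]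
  rw [Array.perm_iff_toList_perm] at h
  simpa [Array.swap] using h

-- loop invariant: the processed prefix is sorted and below the unprocessed suffix
theorem pvSelSortLoop_spec (k : Nat) : ∀ (xs : List Int) (i : Nat), xs.length - i ≤ k →
    (∀ p q, p < i → p ≤ q → q < xs.length → xs.getD p 0 ≤ xs.getD q 0) →
    (pvSelSortLoop xs i).Perm xs ∧ (pvSelSortLoop xs i).Pairwise (· ≤ ·) := by
  induction k with
  | zero =>
    intro xs i hk H
    have hni : ¬ i < xs.length := by omega
    rw [pvSelSortLoop, dif_neg hni]
    refine ⟨List.Perm.refl xs, List.pairwise_iff_getElem.mpr ?_⟩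
    intro p q hp hq hpq
    rw [← List.getD_eq_getElem xs 0 hp, ← List.getD_eq_getElem xs 0 hq]
    exact H p q (by omega) (by omega) hq
  | succ k ih =>
    intro xs i hk H
    by_cases hi : i < xs.length
    · obtain ⟨hm1, hm2, hmin⟩ := pvArgMin_spec xs i hi
      set m := pvArgMinFrom xs i with hmdef
      set xs' := (xs.set m (xs.getD i 0)).set i (xs.getD m 0) with hxs'
      have hlen : xs'.length = xs.length := by simp [hxs']
      have hgd : ∀ q, q < xs.length →
          xs'.getD q 0 = if q = i then xs.getD m 0 else if q = m then xs.getD i 0 else xs.getD q 0 := by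
        intro q hq
        have hq' : q < xs'.length := by omega
        rw [List.getD_eq_getElem _ _ hq']
        simp only [hxs', List.getElem_set]
        by_cases h1 : q = i
        · rw [if_pos h1.symm, if_pos h1]
        · rw [if_neg (fun h => h1 h.symm), if_neg h1]
          by_cases h2 : q = m
          · rw [if_pos h2.symm, if_pos h2]
          · rw [if_neg (fun h => h2 h.symm), if_neg h2, List.getD_eq_getElem _ _ hq]
      have hstep : pvSelSortLoop xs i = pvSelSortLoop xs' (i + 1) := by
        rw [pvSelSortLoop, dif_pos hi]
      have H' : ∀ p q, p < i + 1 → p ≤ q → q < xs'.length → xs'.getD p 0 ≤ xs'.getD q 0 := by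
        intro p q hp hpq hq
        rw [hlen] at hq
        have hpn : p < xs.length := by omega
        rw [hgd p hpn, hgd q hq]
        by_cases hpi : p = i
        · rw [if_pos hpi]
          by_cases hqi : q = i
          · rw [if_pos hqi]
          · rw [if_neg hqi]
            by_cases hqm : q = m
            · rw [if_pos hqm]; exact hmin i (le_refl i) hi
            · rw [if_neg hqm]; exact hmin q (by omega) hq
        · have hplt : p < i := by omega
          have hpm : p ≠ m := by omega
          rw [if_neg hpi, if_neg hpm]
          by_cases hqi : q = i
          · rw [if_pos hqi]; exact H p m hplt (by omega) hm2
          · rw [if_neg hqi]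
            by_cases hqm : q = m
            · rw [if_pos hqm]; exact H p i hplt (by omega) hi
            · rw [if_neg hqm]; exact H p q hplt hpq hq
      obtain ⟨hperm, hpair⟩ := ih xs' (i + 1) (by omega) H'
      rw [hstep]
      exact ⟨hperm.trans (pvSwap_perm xs i m hi hm2), hpair⟩
    · rw [pvSelSortLoop, dif_neg hi]
      refine ⟨List.Perm.refl xs, List.pairwise_iff_getElem.mpr ?_⟩
      intro p q hp hq hpq
      rw [← List.getD_eq_getElem xs 0 hp, ← List.getD_eq_getElem xs 0 hq]
      exact H p q (by omega) (by omega) hq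

theorem pvSelSort_eq_sorted (xs : List Int) :
    pvSelectionSort xs = PySem.List.sorted xs (fun x => x) false := by
  obtain ⟨hperm, hpair⟩ := pvSelSortLoop_spec xs.length xs 0 (by omega)
    (fun p q hp _ _ => absurd hp (Nat.not_lt_zero p))
  exact (PySem.List.sorted_id_eq_of_perm_of_pairwise xs _ hperm hpair).symm

-- ===== VERDICT (by name: the statement is the Claim_ definition above) =====
theorem divIntoGroups_spec : Claim_equal_divIntoGroups := by
  intro A _
  unfold Spec_divIntoGroups
  rw [pvA_char, pvAlt_char]
  exact List.map_congr_left (fun c _ => pvSelSort_eq_sorted c)
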